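-- pv_equiv track=rewrite | github.com/AlifSrSE/ProblemSolves | 2003D1-turtleAndMexProblem.py | solve
-- ===== SOURCE A (Python) =====
-- def solve(a, m):
--     def calculate_mex(arr):
--         seen = set(arr)
--         mex = 0
--         missing_seen = False
--         while True:
--             if mex not in seen:
--                 if missing_seen:
--                     return mex
--                 missing_seen = True
--             mex += 1
--
--     base_value = max(calculate_mex(ai) for ai in a)
--     base_length = min(m + 1, base_value + 1)
--
--     if base_value <= m:
--         sum_part = (base_value + 1 + m) * (m - base_value) // 2
--     else:
--         sum_part = 0
--
--     return base_value * base_length + sum_part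
-- ===== SOURCE B (Python) =====
-- def solve(a, m):
--     def second_mex(arr):
--         vals = sorted(set(x for x in arr if x >= 0))
--         prev = 0
--         missing = 0
--         for v in vals:
--             gap = v - prev          # missing integers in [prev, v)
--             if missing + gap >= 2:
--                 return prev + (1 - missing)
--             missing += gap
--             prev = v + 1
--         return prev + (1 - missing)
--
--     base_value = max(second_mex(ai) for ai in a)
--     base_length = min(m + 1, base_value + 1)
--
--     if base_value <= m:
--         sum_part = (base_value + 1 + m) * (m - base_value) // 2
--     else:
--         sum_part = 0
--
--     return base_value * base_length + sum_part
-- ===== Notes on version B (the rewrite author's own statement) =====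
-- stated objective: alternative
-- what changed: The second mex is computed by sorting the distinct non-negative values once and making a single gap-counting scan over the sorted list, instead of A's upward integer scan with repeated set-membership tests and a flag.
import Mathlib
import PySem

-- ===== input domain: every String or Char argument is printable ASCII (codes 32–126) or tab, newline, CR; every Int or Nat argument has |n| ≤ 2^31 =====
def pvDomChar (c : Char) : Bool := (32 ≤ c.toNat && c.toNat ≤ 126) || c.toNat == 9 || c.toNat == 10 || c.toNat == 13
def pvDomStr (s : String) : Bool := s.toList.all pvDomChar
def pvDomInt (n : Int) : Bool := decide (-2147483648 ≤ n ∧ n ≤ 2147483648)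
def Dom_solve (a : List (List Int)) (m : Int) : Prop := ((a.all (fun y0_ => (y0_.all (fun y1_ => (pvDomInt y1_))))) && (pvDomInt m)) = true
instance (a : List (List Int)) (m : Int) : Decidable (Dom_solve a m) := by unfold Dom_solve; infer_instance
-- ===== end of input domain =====

-- B computes the second mex of each array by sorting its distinct non-negative values
-- once and making a single gap-counting scan over the sorted list, instead of A's
-- upward integer scan with membership tests and a flag.  Objective: alternative.

-- measure lemmas cited by port A's decreasing_by (termination of A's upward scan)
theorem pvFilterLenMono (l : List Int) (s : Int) :
    (l.filter (fun x => decide (s + 1 ≤ x))).length ≤ (l.filter (fun x => decide (s ≤ x))).length := by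
  induction l with
  | nil => simp
  | cons a t ih =>
    by_cases h1 : s + 1 ≤ a
    · have h0 : s ≤ a := by omega
      simp only [List.filter, h1, h0, decide_true, List.length_cons]
      omega
    · by_cases h0 : s ≤ a <;>
        simp only [List.filter, h1, h0, decide_true, decide_false, List.length_cons] <;> omega

theorem pvFilterLenDec (l : List Int) (s : Int) (h : s ∈ l) :
    (l.filter (fun x => decide (s + 1 ≤ x))).length < (l.filter (fun x => decide (s ≤ x))).length := by
  induction l with
  | nil => cases h
  | cons a t ih =>
    rcases List.mem_cons.mp h with rfl | hm
    · have h1 : ¬ (s + 1 ≤ s) := by omega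
      have h0 : s ≤ s := le_rfl
      simp only [List.filter, h1, h0, decide_true, decide_false, List.length_cons]
      have := pvFilterLenMono t s
      omega
    · by_cases h1 : s + 1 ≤ a
      · have h0 : s ≤ a := by omega
        simp only [List.filter, h1, h0, decide_true, List.length_cons]
        have := ih hm; omega
      · by_cases h0 : s ≤ a <;>
          simp only [List.filter, h1, h0, decide_true, decide_false, List.length_cons] <;>
          have := ih hm <;> omega

-- ===== PORT A =====
-- A's while-loop: one upward scan with a 'missing_seen' flag, returning the second missing value
def pvLoopA (seen : List Int) (mex : Int) (missing_seen : Bool) : Int :=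
  if h : ¬ seen.contains mex then
    (if hm : missing_seen then mex else pvLoopA seen (mex + 1) true)
  else
    pvLoopA seen (mex + 1) missing_seen
termination_by (seen.filter (fun x => decide (mex ≤ x))).length * 2 + (if missing_seen then 0 else 1)
decreasing_by
  · have := pvFilterLenMono seen mex
    simp only [Bool.not_eq_true] at hm
    subst hm
    simp only [if_true, Bool.false_eq_true, if_false]
    omega
  · have hc : mex ∈ seen := by
      simp only [Decidable.not_not] at h
      exact List.contains_iff_mem.mp h
    have := pvFilterLenDec seen mex hc
    omega

def pvCalcMex (arr : List Int) : Int :=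
  pvLoopA (PySem.Set.ofList arr) 0 false

def solve (a : List (List Int)) (m : Int) : Int :=
  let vals := a.map (fun ai => pvCalcMex ai)
  let base_value := (PySem.List.max? vals (fun x => x)).getD 0   -- Python max; vals ≠ [] under Pre_solve
  let base_length := min (m + 1) (base_value + 1)
  let sum_part := if base_value ≤ m then PySem.Int.floordiv ((base_value + 1 + m) * (m - base_value)) 2 else 0
  base_value * base_length + sum_part

-- ===== PORT B =====
-- B's for-loop over the sorted distinct values, counting the missing integers in each gap
def pvScan : List Int → Int → Int → Int
  | [], prev, missing => prev + (1 - missing)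
  | v :: t, prev, missing =>
    if missing + (v - prev) ≥ 2 then prev + (1 - missing)
    else pvScan t (v + 1) (missing + (v - prev))

def pvSecondMex (arr : List Int) : Int :=
  let vals := PySem.List.sorted (PySem.Set.ofList (arr.filter (fun x => decide (0 ≤ x)))) (fun x => x) false
  pvScan vals 0 0

def solve_alt (a : List (List Int)) (m : Int) : Int :=
  let vals := a.map (fun ai => pvSecondMex ai)
  let base_value := (PySem.List.max? vals (fun x => x)).getD 0
  let base_length := min (m + 1) (base_value + 1)
  let sum_part := if base_value ≤ m then PySem.Int.floordiv ((base_value + 1 + m) * (m - base_value)) 2 else 0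
  base_value * base_length + sum_part

-- ===== PRECONDITION & SPEC =====
-- Pre_ excludes only a = [], on which Python's max over an empty generator raises ValueError.
def Pre_solve (a : List (List Int)) (m : Int) : Prop := a ≠ []
instance (a : List (List Int)) (m : Int) : Decidable (Pre_solve a m) := by unfold Pre_solve; infer_instance
def pvWitness_solve : List (List Int) × Int := ([[0, 1, 3], [2]], 5)

def Spec_solve (a : List (List Int)) (m : Int) (out : Int) : Prop := out = solve_alt a m
instance (a : List (List Int)) (m : Int) (out : Int) : Decidable (Spec_solve a m out) := by unfold Spec_solve; infer_instance

-- ===== CLAIM (what is proved, stated in full; the proofs are below) =====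
def Claim_equal_solve : Prop := ∀ (a : List (List Int)) (m : Int), Dom_solve a m → Pre_solve a m → Spec_solve a m (solve a m)

-- ===== LEMMAS AND PROOFS =====

theorem pvLoopA_step (seen : List Int) (mex : Int) (f : Bool) (h : mex ∈ seen) :
    pvLoopA seen mex f = pvLoopA seen (mex + 1) f := by
  rw [pvLoopA]; simp [h]

theorem pvLoopA_stop (seen : List Int) (mex : Int) (h : mex ∉ seen) :
    pvLoopA seen mex true = mex := by
  rw [pvLoopA]; simp [h]

theorem pvLoopA_flip (seen : List Int) (mex : Int) (h : mex ∉ seen) :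
    pvLoopA seen mex false = pvLoopA seen (mex + 1) true := by
  rw [pvLoopA]; simp [h]

-- the gap scan over the sorted distinct values ≥ prev equals A's flagged upward scan from prev
theorem pvScan_eq_loopA (s : List Int) : ∀ (seen : List Int) (prev : Int) (flag : Bool),
    s.Pairwise (· < ·) → (∀ x, x ∈ s ↔ x ∈ seen ∧ prev ≤ x) →
    pvScan s prev (if flag then 1 else 0) = pvLoopA seen prev flag := by
  induction s with
  | nil =>
    intro seen prev flag _ hmem
    have h0 : prev ∉ seen := fun h => by
      have := (hmem prev).mpr ⟨h, le_rfl⟩; simp at this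
    have h1 : prev + 1 ∉ seen := fun h => by
      have := (hmem (prev + 1)).mpr ⟨h, by omega⟩; simp at this
    cases flag with
    | true => rw [pvLoopA_stop seen prev h0]; simp [pvScan]
    | false =>
      rw [pvLoopA_flip seen prev h0, pvLoopA_stop seen (prev + 1) h1]; simp [pvScan]
  | cons v t ih =>
    intro seen prev flag hpw hmem
    have hvt : ∀ x ∈ t, v < x := (List.pairwise_cons.mp hpw).1
    have hpt : t.Pairwise (· < ·) := (List.pairwise_cons.mp hpw).2
    have hv : v ∈ seen ∧ prev ≤ v := (hmem v).mp (List.mem_cons_self ..)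
    have hgap : ∀ w, prev ≤ w → w < v → w ∉ seen := by
      intro w hw1 hw2 hws
      rcases List.mem_cons.mp ((hmem w).mpr ⟨hws, hw1⟩) with rfl | hwt
      · omega
      · exact absurd (hvt w hwt) (by omega)
    have hmemt : ∀ x, x ∈ t ↔ x ∈ seen ∧ v + 1 ≤ x := by
      intro x
      constructor
      · intro hx
        have := (hmem x).mp (List.mem_cons_of_mem _ hx)
        exact ⟨this.1, by have := hvt x hx; omega⟩
      · intro ⟨hx1, hx2⟩
        rcases List.mem_cons.mp ((hmem x).mpr ⟨hx1, by omega⟩) with rfl | hxt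
        · omega
        · exact hxt
    cases flag with
    | false =>
      show pvScan (v :: t) prev 0 = pvLoopA seen prev false
      by_cases h2 : v - prev ≥ 2
      · -- gap ≥ 2: A flags at prev and returns prev+1; B returns prev+1 immediately
        have h0 : prev ∉ seen := hgap prev le_rfl (by omega)
        have h1 : prev + 1 ∉ seen := hgap (prev + 1) (by omega) (by omega)
        rw [pvLoopA_flip seen prev h0, pvLoopA_stop seen (prev + 1) h1]
        simp only [pvScan]
        rw [if_pos (by omega)]
        omega
      · by_cases h1 : v = prev
        · -- gap 0: both step past v
          subst h1
          rw [pvLoopA_step seen v false hv.1]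
          simp only [pvScan]
          rw [if_neg (by omega), show (0 : Int) + (v - v) = 0 by omega]
          exact ih seen (v + 1) false hpt hmemt
        · -- gap 1: A flags at prev then steps past v = prev+1; B carries missing = 1
          have hv1 : v = prev + 1 := by omega
          have h0 : prev ∉ seen := hgap prev le_rfl (by omega)
          rw [pvLoopA_flip seen prev h0]
          have hstep : pvLoopA seen (prev + 1) true = pvLoopA seen (v + 1) true := by
            rw [← hv1, pvLoopA_step seen v true hv.1]
          rw [hstep]
          simp only [pvScan]
          rw [if_neg (by omega), show (0 : Int) + (v - prev) = 1 by omega]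
          exact ih seen (v + 1) true hpt hmemt
    | true =>
      show pvScan (v :: t) prev 1 = pvLoopA seen prev true
      by_cases h1 : v = prev
      · -- gap 0: both step past v
        subst h1
        rw [pvLoopA_step seen v true hv.1]
        simp only [pvScan]
        rw [if_neg (by omega), show (1 : Int) + (v - v) = 1 by omega]
        exact ih seen (v + 1) true hpt hmemt
      · -- gap ≥ 1 with the flag set: A returns prev; B returns prev
        have h0 : prev ∉ seen := hgap prev le_rfl (by omega)
        rw [pvLoopA_stop seen prev h0]
        simp only [pvScan]
        rw [if_pos (by omega)]
        omega

theorem pvCalcMex_eq (arr : List Int) : pvCalcMex arr = pvSecondMex arr := by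
  unfold pvCalcMex pvSecondMex
  have hpw : (PySem.List.sorted (PySem.Set.ofList (arr.filter (fun x => decide (0 ≤ x)))) (fun x => x) false).Pairwise (· < ·) :=
    PySem.List.sorted_ofList_pairwise_lt _
  have hmem : ∀ x, x ∈ PySem.List.sorted (PySem.Set.ofList (arr.filter (fun x => decide (0 ≤ x)))) (fun x => x) false ↔
      x ∈ PySem.Set.ofList arr ∧ (0 : Int) ≤ x := by
    intro x
    rw [PySem.List.mem_sorted, PySem.Set.mem_ofList, List.mem_filter, PySem.Set.mem_ofList]
    simp
  have := pvScan_eq_loopA _ (PySem.Set.ofList arr) 0 false hpw hmem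
  simp only [if_neg (Bool.false_ne_true)] at this
  exact this.symm

-- ===== VERDICT (by name: the statement is the Claim_ definition above) =====
theorem solve_spec : Claim_equal_solve := by
  intro a m _ _
  unfold Spec_solve solve solve_alt
  rw [funext pvCalcMex_eq]
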